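-- pv_equiv track=rewrite | github.com/jinuemong/algorithm-data-structure-study | Programmers_lv2_2/2개 이하로 다른 비트.py | check_xor
-- ===== SOURCE A (Python) =====
-- def check_xor(number_bit,data):
--     data_bit,count= make_bit(data),0
--     max_len = max(len(number_bit),len(data_bit))
--     number_bit = (max_len-len(number_bit))*"0"+number_bit
--     data_bit = (max_len-len(data_bit))*"0"+data_bit
--     for i,j in zip(number_bit,data_bit):
--         if i!=j:
--             count+=1
--     if count<=2:
--         return data
--     else:
--         return -1
--
-- def make_bit(data):
--     result = ""
--     while data>0:
--         result = str(data%2)+result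
--         data//=2
--     return result
-- ===== SOURCE B (Python) =====
-- def check_xor(number_bit, data):
--     # Right-to-left arithmetic bit extraction: no binary string is built,
--     # no padding; remaining high bits of data are counted by a popcount loop.
--     d = data if data > 0 else 0
--     count = 0
--     for ch in reversed(number_bit):
--         bit = d % 2
--         d //= 2
--         if ch != str(bit):
--             count += 1
--     while d > 0:
--         count += d % 2
--         d //= 2
--     return data if count <= 2 else -1
-- ===== Notes on version B (the rewrite author's own statement) =====
-- stated objective: simpler
-- what changed: Replaces make_bit's binary-string construction, zero-padding and zip over padded strings by a single right-to-left pass that extracts bits of data arithmetically, plus a popcount loop for the leftover high bits.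
import Mathlib
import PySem

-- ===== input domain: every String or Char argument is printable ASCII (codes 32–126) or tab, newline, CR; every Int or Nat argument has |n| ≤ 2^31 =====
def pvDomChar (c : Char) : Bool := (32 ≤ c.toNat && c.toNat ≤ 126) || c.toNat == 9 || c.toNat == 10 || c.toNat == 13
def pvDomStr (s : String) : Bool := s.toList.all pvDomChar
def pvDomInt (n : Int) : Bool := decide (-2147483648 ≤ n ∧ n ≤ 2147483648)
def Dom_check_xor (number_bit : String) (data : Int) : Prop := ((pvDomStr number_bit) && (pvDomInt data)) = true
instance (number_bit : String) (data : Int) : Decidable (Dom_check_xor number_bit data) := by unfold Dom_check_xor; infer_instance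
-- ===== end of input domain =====

-- B replaces make_bit's string building, zero-padding and positional zip by one
-- right-to-left pass extracting bits of data arithmetically (objective: simpler).

-- ===== PORT A =====
-- while data>0: result = str(data%2)+result; data //= 2
def makeBitLoop (data : Int) (result : List Char) : List Char :=
  if 0 < data then
    makeBitLoop (PySem.Int.floordiv data 2) (PySem.Int.toChars (PySem.Int.mod data 2) ++ result)
  else result
termination_by data.toNat
decreasing_by
  rw [PySem.Int.floordiv_eq_ediv_of_pos (by norm_num : (0:Int) < 2)]
  omega

def check_xor (number_bit : String) (data : Int) : Int :=
  let data_bit := makeBitLoop data []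
  let nb := number_bit.toList
  let max_len := Nat.max nb.length data_bit.length
  -- (max_len - len)*"0" + s : the repeat count is ≥ 0 here, so Nat subtraction is exact
  let nb2 := List.replicate (max_len - nb.length) '0' ++ nb
  let db2 := List.replicate (max_len - data_bit.length) '0' ++ data_bit
  let count : Int := (nb2.zip db2).foldl (fun c p => if p.1 ≠ p.2 then c + 1 else c) 0
  if count ≤ 2 then data else -1

-- ===== PORT B =====
-- while d>0: count += d%2; d //= 2
def popLoop (d count : Int) : Int :=
  if 0 < d then popLoop (PySem.Int.floordiv d 2) (count + PySem.Int.mod d 2) else count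
termination_by d.toNat
decreasing_by
  rw [PySem.Int.floordiv_eq_ediv_of_pos (by norm_num : (0:Int) < 2)]
  omega

-- loop body: bit = d % 2; d //= 2; if ch != str(bit): count += 1
def bStep (st : Int × Int) (ch : Char) : Int × Int :=
  let bit := PySem.Int.mod st.1 2
  (PySem.Int.floordiv st.1 2, if [ch] ≠ PySem.Int.toChars bit then st.2 + 1 else st.2)

def check_xor_alt (number_bit : String) (data : Int) : Int :=
  let d0 : Int := if 0 < data then data else 0
  let st := number_bit.toList.reverse.foldl bStep (d0, 0)
  let count := popLoop st.1 st.2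
  if count ≤ 2 then data else -1

-- ===== PRECONDITION & SPEC =====
def Spec_check_xor (number_bit : String) (data : Int) (out : Int) : Prop := out = check_xor_alt number_bit data
instance (number_bit : String) (data : Int) (out : Int) : Decidable (Spec_check_xor number_bit data out) := by unfold Spec_check_xor; infer_instance

-- ===== CLAIM (what is proved, stated in full; the proofs are below) =====
def Claim_equal_check_xor : Prop := ∀ (number_bit : String) (data : Int), Dom_check_xor number_bit data → Spec_check_xor number_bit data (check_xor number_bit data)

-- ===== LEMMAS AND PROOFS =====

-- A's mismatch count, as a standalone function of the raw list and data_bit list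
def zcPad (nb mb : List Char) : Int :=
  let L := Nat.max nb.length mb.length
  (((List.replicate (L - nb.length) '0' ++ nb).zip
    (List.replicate (L - mb.length) '0' ++ mb)).foldl
      (fun c p => if p.1 ≠ p.2 then c + 1 else c) 0 : Int)

-- B's mismatch count
def mismB (nb : List Char) (d : Int) : Int :=
  let st := nb.reverse.foldl bStep (d, 0)
  popLoop st.1 st.2

theorem halfInd (P : Int → Prop)
    (step : ∀ d : Int, (0 < d → P (PySem.Int.floordiv d 2)) → P d) : ∀ d : Int, P d := by
  have key : ∀ n : Nat, ∀ d : Int, d.toNat ≤ n → P d := by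
    intro n
    induction n with
    | zero =>
        intro d hd
        apply step
        intro h0
        exact absurd hd (by omega)
    | succ n ih =>
        intro d hd
        apply step
        intro h0
        apply ih
        rw [PySem.Int.floordiv_eq_ediv_of_pos (by norm_num : (0:Int) < 2)]
        omega
  exact fun d => key d.toNat d le_rfl

theorem toChars_zero : PySem.Int.toChars 0 = ['0'] := by decide
theorem toChars_one : PySem.Int.toChars 1 = ['1'] := by decide

theorem makeBitLoop_acc (d : Int) :
    ∀ acc : List Char, makeBitLoop d acc = makeBitLoop d [] ++ acc := by
  refine halfInd (fun d => ∀ acc : List Char, makeBitLoop d acc = makeBitLoop d [] ++ acc) ?_ d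
  intro d ih acc
  by_cases hd : 0 < d
  · rw [makeBitLoop, if_pos hd, show makeBitLoop d [] =
      makeBitLoop (PySem.Int.floordiv d 2) (PySem.Int.toChars (PySem.Int.mod d 2) ++ [])
      by rw [makeBitLoop, if_pos hd]]
    rw [ih hd, ih hd (PySem.Int.toChars (PySem.Int.mod d 2) ++ [])]
    simp
  · rw [makeBitLoop, if_neg hd, makeBitLoop, if_neg hd]
    simp

theorem mod_two_cases (d : Int) : PySem.Int.mod d 2 = 0 ∨ PySem.Int.mod d 2 = 1 := by
  rw [PySem.Int.mod_eq_emod_of_pos (by norm_num)]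
  omega

theorem makeBit_pos (d : Int) (hd : 0 < d) :
    makeBitLoop d [] =
      makeBitLoop (PySem.Int.floordiv d 2) [] ++ [if PySem.Int.mod d 2 = 1 then '1' else '0'] := by
  rw [makeBitLoop, if_pos hd, makeBitLoop_acc]
  rcases mod_two_cases d with h | h <;> rw [h] <;> simp [toChars_zero, toChars_one]

theorem makeBit_nonpos (d : Int) (hd : ¬ 0 < d) : makeBitLoop d [] = [] := by
  rw [makeBitLoop, if_neg hd]

-- fold counting = countP
theorem zc_countP (l : List (Char × Char)) (c : Int) :
    l.foldl (fun c p => if p.1 ≠ p.2 then c + 1 else c) c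
      = c + (l.countP (fun p => p.1 != p.2) : Int) := by
  induction l generalizing c with
  | nil => simp
  | cons p l ih =>
      simp only [List.foldl_cons, List.countP_cons, ih]
      by_cases h : p.1 = p.2 <;> simp [h] <;> push_cast <;> ring

-- popLoop offset
theorem popLoop_add (d : Int) : ∀ a c : Int, popLoop d (a + c) = a + popLoop d c := by
  refine halfInd (fun d => ∀ a c : Int, popLoop d (a + c) = a + popLoop d c) ?_ d
  intro d ih a c
  by_cases hd : 0 < d
  · rw [popLoop, if_pos hd]
    conv_rhs => rw [popLoop, if_pos hd]
    rw [add_assoc, ih hd]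
  · rw [popLoop, if_neg hd, popLoop, if_neg hd]

-- popLoop counts the '1' digits of makeBit
theorem popLoop_eq_count (d : Int) :
    popLoop d 0 = ((makeBitLoop d []).countP (fun c => c != '0') : Int) := by
  refine halfInd
    (fun d => popLoop d 0 = ((makeBitLoop d []).countP (fun c => c != '0') : Int)) ?_ d
  intro d ih
  by_cases hd : 0 < d
  · rw [popLoop, if_pos hd, makeBit_pos d hd,
      show ((0:Int) + PySem.Int.mod d 2) = PySem.Int.mod d 2 + 0 by ring,
      popLoop_add, ih hd, List.countP_append]
    rcases mod_two_cases d with h | h <;> rw [h] <;> simp <;> push_cast <;> ring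
  · rw [popLoop, if_neg hd, makeBit_nonpos d hd]
    simp

-- zip against an all-'0' pad counts the non-'0' chars
theorem zip_replicate_countP (mb : List Char) :
    ((List.replicate mb.length '0').zip mb).countP (fun p => p.1 != p.2)
      = mb.countP (fun c => c != '0') := by
  induction mb with
  | nil => simp
  | cons c mb ih => simp [List.replicate_succ, List.countP_cons, ih, bne_comm]

-- foldl bStep: the first (d) component does not depend on the count seed
theorem bFst (l : List Char) : ∀ d c : Int,
    (l.foldl bStep (d, c)).1 = (l.foldl bStep (d, 0)).1 := by
  induction l with
  | nil => intro d c; rfl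
  | cons ch l ih =>
      intro d c
      simp only [List.foldl_cons, bStep]
      exact (ih _ _).trans (ih _ _).symm

-- foldl bStep: the count component is an additive accumulator
theorem bSnd (l : List Char) : ∀ d c : Int,
    (l.foldl bStep (d, c)).2 = c + (l.foldl bStep (d, 0)).2 := by
  induction l with
  | nil => intro d c; simp
  | cons ch l ih =>
      intro d c
      have e1 := ih (PySem.Int.floordiv d 2)
        (if [ch] ≠ PySem.Int.toChars (PySem.Int.mod d 2) then c + 1 else c)
      have e2 := ih (PySem.Int.floordiv d 2)
        (if [ch] ≠ PySem.Int.toChars (PySem.Int.mod d 2) then (0:Int) + 1 else 0)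
      simp only [List.foldl_cons, bStep]
      rw [e1, e2]
      split_ifs <;> ring

-- B peels the last character of nb
theorem mismB_concat (nb : List Char) (ch : Char) (d : Int) :
    mismB (nb ++ [ch]) d =
      (if [ch] ≠ PySem.Int.toChars (PySem.Int.mod d 2) then 1 else 0)
        + mismB nb (PySem.Int.floordiv d 2) := by
  unfold mismB
  simp only [List.reverse_append, List.reverse_cons, List.reverse_nil, List.nil_append,
    List.singleton_append, List.foldl_cons]
  have h1 : (List.foldl bStep (bStep (d, 0) ch) nb.reverse).1
      = (List.foldl bStep (PySem.Int.floordiv d 2, 0) nb.reverse).1 := bFst _ _ _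
  have h2 : (List.foldl bStep (bStep (d, 0) ch) nb.reverse).2
      = (if [ch] ≠ PySem.Int.toChars (PySem.Int.mod d 2) then (0:Int) + 1 else 0)
        + (List.foldl bStep (PySem.Int.floordiv d 2, 0) nb.reverse).2 := bSnd _ _ _
  rw [h1, h2, popLoop_add]
  by_cases h : [ch] = PySem.Int.toChars (PySem.Int.mod d 2) <;> simp [h]

-- equal-length zip-count append
theorem zc_append (x y : List Char) (a b : Char) (h : x.length = y.length) :
    ((x ++ [a]).zip (y ++ [b])).countP (fun p => p.1 != p.2)
      = (x.zip y).countP (fun p => p.1 != p.2) + (if a != b then 1 else 0) := by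
  rw [List.zip_append h, List.countP_append]
  simp [List.countP_cons]

theorem length_pad (x : List Char) (L : Nat) (h : x.length ≤ L) :
    (List.replicate (L - x.length) '0' ++ x).length = L := by
  simp; omega

-- A peels the last character of both padded strings
theorem zcPad_concat_aux (nb mb : List Char) (ch dig : Char) :
    zcPad (nb ++ [ch]) (mb ++ [dig])
      = (if ch = dig then 0 else 1) + zcPad nb mb := by
  unfold zcPad
  simp only [List.length_append, List.length_singleton]
  have hln := Nat.le_max_left nb.length mb.length
  have hrn := Nat.le_max_right nb.length mb.length
  have hL : Nat.max (nb.length + 1) (mb.length + 1) = Nat.max nb.length mb.length + 1 :=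
    Nat.succ_max_succ _ _
  rw [hL]
  have h1 : Nat.max nb.length mb.length + 1 - (nb.length + 1)
      = Nat.max nb.length mb.length - nb.length := by omega
  have h2 : Nat.max nb.length mb.length + 1 - (mb.length + 1)
      = Nat.max nb.length mb.length - mb.length := by omega
  rw [h1, h2, ← List.append_assoc, ← List.append_assoc, zc_countP, zc_countP]
  rw [zc_append _ _ _ _ (by
    rw [length_pad _ _ (by omega), length_pad _ _ (by omega)])]
  by_cases h : ch = dig <;> simp [h] <;> push_cast <;> ring

-- the d = 0 form: against the empty bit string, the pad grows by one '0'
theorem zcPad_concat_nil (nb : List Char) (ch : Char) :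
    zcPad (nb ++ [ch]) [] = (if ch = '0' then 0 else 1) + zcPad nb [] := by
  have h : zcPad (nb ++ [ch]) [] = zcPad (nb ++ [ch]) ([] ++ ['0']) := by
    unfold zcPad
    simp only [List.nil_append, List.length_append, List.length_singleton, List.length_nil]
    have e0 : Nat.max (nb.length + 1) 0 = nb.length + 1 := Nat.max_zero _
    have e1 : Nat.max (nb.length + 1) 1 = nb.length + 1 := Nat.max_eq_left (by omega)
    rw [e0, e1]
    simp only [Nat.sub_self, Nat.sub_zero, Nat.add_sub_cancel, List.append_nil,
      List.replicate_succ']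
  rw [h, zcPad_concat_aux]

theorem zcPad_concat (nb : List Char) (ch : Char) (d : Int) (hd0 : 0 ≤ d) :
    zcPad (nb ++ [ch]) (makeBitLoop d [])
      = (if [ch] ≠ PySem.Int.toChars (PySem.Int.mod d 2) then 1 else 0)
        + zcPad nb (makeBitLoop (PySem.Int.floordiv d 2) []) := by
  by_cases hd : 0 < d
  · rw [makeBit_pos d hd, zcPad_concat_aux]
    rcases mod_two_cases d with h | h <;> rw [h] <;>
      simp only [toChars_zero, toChars_one, reduceIte] <;>
      by_cases hc : ch = '0' <;> by_cases hc1 : ch = '1' <;> simp_all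
  · have hfd : ¬ 0 < PySem.Int.floordiv d 2 := by
      rw [PySem.Int.floordiv_eq_ediv_of_pos (by norm_num : (0:Int) < 2)]
      omega
    have hmod0 : PySem.Int.mod d 2 = 0 := by
      rw [PySem.Int.mod_eq_emod_of_pos (by norm_num : (0:Int) < 2)]
      omega
    rw [makeBit_nonpos d hd, makeBit_nonpos _ hfd, zcPad_concat_nil, hmod0, toChars_zero]
    by_cases hc : ch = '0' <;> simp [hc]

-- main: B's count equals A's padded zip count, for every d
theorem misms_eq (nb : List Char) : ∀ d : Int, 0 ≤ d →
    mismB nb d = zcPad nb (makeBitLoop d []) := by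
  induction nb using List.reverseRecOn with
  | nil =>
      intro d _
      unfold mismB zcPad
      simp only [List.reverse_nil, List.foldl_nil, List.length_nil, Nat.zero_max, Nat.sub_zero,
        Nat.sub_self, List.replicate, List.append_nil, List.nil_append]
      rw [popLoop_eq_count, zc_countP, zip_replicate_countP]
      simp
  | append_singleton nb ch ih =>
      intro d hd0
      rw [mismB_concat, zcPad_concat nb ch d hd0,
        ih (PySem.Int.floordiv d 2) (by
          rw [PySem.Int.floordiv_eq_ediv_of_pos (by norm_num : (0:Int) < 2)]
          omega)]

theorem check_xor_eq (number_bit : String) (data : Int) :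
    check_xor number_bit data = check_xor_alt number_bit data := by
  show (if zcPad number_bit.toList (makeBitLoop data []) ≤ 2 then data else -1)
      = (if mismB number_bit.toList (if 0 < data then data else 0) ≤ 2 then data else -1)
  by_cases hd : 0 < data
  · rw [if_pos hd, misms_eq number_bit.toList data (by omega)]
  · rw [if_neg hd, misms_eq number_bit.toList 0 (by omega), makeBit_nonpos data hd,
      makeBit_nonpos 0 (by omega)]

-- ===== VERDICT (by name: the statement is the Claim_ definition above) =====
theorem check_xor_spec : Claim_equal_check_xor := by
  intro number_bit data _
  unfold Spec_check_xor
  exact check_xor_eq number_bit data
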